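-- pv_equiv track=rewrite | github.com/tnicko1/Retail-Operations-Suite | app.py | process_specifications
-- ===== SOURCE A (Python) =====
-- def process_specifications(specs):
--     first_warranty_found = False
--     filtered_specs = []
--     for spec in specs:
--         if 'warranty' in spec.lower():
--             if not first_warranty_found:
--                 filtered_specs.append(spec)
--                 first_warranty_found = True
--         else:
--             filtered_specs.append(spec)
--     return filtered_specs
-- ===== SOURCE B (Python) =====
-- def process_specifications(specs):
--     # Find-then-split: locate the first warranty spec, keep everything up to
--     # and including it, and filter warranty entries out of the remainder.
--     for k, s in enumerate(specs):
--         if 'warranty' in s.lower():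
--             return specs[:k + 1] + [t for t in specs[k + 1:] if 'warranty' not in t.lower()]
--     return list(specs)
-- ===== Notes on version B (the rewrite author's own statement) =====
-- stated objective: alternative
-- what changed: Replaces the single stateful-flag accumulation loop by a find-then-split decomposition: locate the first warranty entry, keep the prefix through it verbatim, and filter warranty entries only out of the suffix.
import Mathlib
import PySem

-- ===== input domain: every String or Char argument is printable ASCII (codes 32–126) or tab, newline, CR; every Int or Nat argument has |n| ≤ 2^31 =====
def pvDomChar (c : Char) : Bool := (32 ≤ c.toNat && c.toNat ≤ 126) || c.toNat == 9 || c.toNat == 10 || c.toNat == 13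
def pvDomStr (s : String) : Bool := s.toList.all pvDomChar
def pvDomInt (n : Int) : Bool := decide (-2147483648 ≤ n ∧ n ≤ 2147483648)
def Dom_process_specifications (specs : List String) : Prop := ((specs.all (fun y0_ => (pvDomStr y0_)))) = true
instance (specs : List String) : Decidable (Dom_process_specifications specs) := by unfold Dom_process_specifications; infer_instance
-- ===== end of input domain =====

-- ===== PORT A =====
-- ===== PORT A =====
-- one stateful pass: flag marks whether a warranty spec was already kept
def process_specifications (specs : List String) : List String :=
  (specs.foldl
    (fun (st : Bool × List String) spec =>
      if PySem.Str.isIn "warranty" (PySem.Str.lower spec) then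
        if !st.1 then (true, st.2 ++ [spec]) else st
      else (st.1, st.2 ++ [spec]))
    (false, [])).2

-- ===== PORT B =====
-- B: find-then-split — walk with an index looking for the first warranty spec;
-- on hit return specs[:k+1] ++ [t for t in specs[k+1:] if no warranty], else a copy.
def psAltGo (specs : List String) (rest : List String) (k : Nat) : List String :=
  match rest with
  | [] => specs
  | s :: rs =>
    if PySem.Str.isIn "warranty" (PySem.Str.lower s) then
      PySem.List.slice specs none (some ((k : Int) + 1)) ++
        (PySem.List.slice specs (some ((k : Int) + 1)) none).filter
          (fun t => !PySem.Str.isIn "warranty" (PySem.Str.lower t))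
    else psAltGo specs rs (k + 1)

def process_specifications_alt (specs : List String) : List String :=
  psAltGo specs specs 0

-- ===== PRECONDITION & SPEC =====
def Spec_process_specifications (specs : List String) (out : List String) : Prop := out = process_specifications_alt specs
instance (specs : List String) (out : List String) : Decidable (Spec_process_specifications specs out) := by unfold Spec_process_specifications; infer_instance

-- ===== CLAIM (what is proved, stated in full; the proofs are below) =====
def Claim_equal_process_specifications : Prop := ∀ (specs : List String), Dom_process_specifications specs → Spec_process_specifications specs (process_specifications specs)

-- ===== LEMMAS AND PROOFS =====

def psW (s : String) : Bool := PySem.Str.isIn "warranty" (PySem.Str.lower s)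

theorem psW_def (s : String) : PySem.Str.isIn "warranty" (PySem.Str.lower s) = psW s := rfl

def psStep (st : Bool × List String) (spec : String) : Bool × List String :=
  if psW spec then (if !st.1 then (true, st.2 ++ [spec]) else st) else (st.1, st.2 ++ [spec])

-- canonical form: like A's loop, written structurally
def psF (l : List String) : List String :=
  match l with
  | [] => []
  | s :: rs => if psW s then s :: rs.filter (fun t => !psW t) else s :: psF rs

theorem psA_true (l : List String) (acc : List String) :
    l.foldl psStep (true, acc) = (true, acc ++ l.filter (fun t => !psW t)) := by
  induction l generalizing acc with
  | nil => simp
  | cons s rs ih =>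
    cases h : psW s with
    | true => simp only [List.foldl, psStep, h, List.filter]; simp [ih]
    | false => simp only [List.foldl, psStep, h, List.filter]; simp [ih]

theorem psA_false (l : List String) (acc : List String) :
    (l.foldl psStep (false, acc)).2 = acc ++ psF l := by
  induction l generalizing acc with
  | nil => simp [psF]
  | cons s rs ih =>
    cases h : psW s with
    | true => simp only [List.foldl, psStep, h, psF]; simp [psA_true]
    | false => simp only [List.foldl, psStep, h, psF]; simp [ih]

theorem psAltGo_eq (specs : List String) (rest : List String) (k : Nat)
    (hrest : rest = specs.drop k) :
    psAltGo specs rest k = specs.take k ++ psF rest := by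
  induction rest generalizing k with
  | nil =>
    have hk : specs.length ≤ k := by
      by_contra h
      have := List.drop_eq_nil_iff.mp hrest.symm
      omega
    simp [psAltGo, psF, List.take_of_length_le hk]
  | cons s rs ih =>
    have hget : specs[k]? = some s := by
      have h0 : (List.drop k specs)[0]? = some s := by rw [← hrest]; rfl
      simpa [List.getElem?_drop] using h0
    have htake : specs.take (k + 1) = specs.take k ++ [s] := by
      rw [List.take_add_one, hget]; simp
    have hdrop : specs.drop (k + 1) = rs := by
      have h1 : List.drop 1 (List.drop k specs) = List.drop (k + 1) specs := List.drop_drop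
      rw [← h1, ← hrest]; rfl
    cases h : psW s with
    | true =>
      simp only [psAltGo, psW_def, h, if_pos]
      have h1 : ((k : Int) + 1) = ((k + 1 : Nat) : Int) := by push_cast; ring
      rw [h1, PySem.List.slice_to_natCast, PySem.List.slice_from_natCast, htake, hdrop]
      simp [psF, h]
    | false =>
      simp only [psAltGo, psW_def, h, Bool.false_eq_true, if_neg, not_false_iff]
      rw [ih (k + 1) hdrop.symm, htake]
      simp [psF, h]

-- ===== VERDICT (by name: the statement is the Claim_ definition above) =====
theorem process_specifications_spec : Claim_equal_process_specifications := by
  intro specs _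
  show (specs.foldl psStep (false, [])).2 = process_specifications_alt specs
  rw [psA_false]
  show _ = psAltGo specs specs 0
  rw [psAltGo_eq specs specs 0 (by simp)]
  simp
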